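-- pv_equiv track=rewrite | github.com/adamelsawaf/rubiksCubeSolver | rubiksCubeSolver.py | replaceSubsetInList
-- ===== SOURCE A (Python) =====
-- from typing import Any, Callable
--
-- def replaceSubsetInList(L: list, S: set, replacement: Any) -> list:
--     if(type(L) != list):
--         raise TypeError(f"replaceSubsetInList:\n\tparameter L: \"{str(L)}\" is not a list.")
--     elif(type(S) != set):
--         raise TypeError(f"replaceSubsetInList:\n\tparameter S: \"{str(S)}\" is not a set.")
--     elif(len(S) == 0):
--         return L
--     else:
--         i: int = 0
--         result: list = []
--         while(i <= len(L) - len(S)):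
--             if(set(L[i: i + len(S)]) == S):
--                 result.append(replacement)
--                 i += len(S)
--             else:
--                 result.append(L[i])
--                 i += 1
--
--         return result + L[i:]
-- ===== SOURCE B (Python) =====
-- def replaceSubsetInList(L: list, S: set, replacement):
--     k = len(S)
--     if k == 0:
--         return L
--     n = len(L)
--     # d[i] = length of the longest prefix of L[i:] whose elements are pairwise
--     # distinct and all belong to S (computed right-to-left in one pass).
--     d = [0] * (n + 1)
--     nxt = {}  # value -> smallest index > current i where it occurs
--     for i in range(n - 1, -1, -1):
--         x = L[i]
--         if x in S:
--             d[i] = min(d[i + 1] + 1, nxt.get(x, n) - i)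
--         nxt[x] = i
--     # a window of length k starting at i equals S as a set  iff  d[i] >= k
--     result = []
--     i = 0
--     while i + k <= n:
--         if d[i] >= k:
--             result.append(replacement)
--             i += k
--         else:
--             result.append(L[i])
--             i += 1
--     return result + L[i:]
-- ===== Notes on version B (the rewrite author's own statement) =====
-- stated objective: faster
-- what changed: Instead of building set(L[i:i+k]) and comparing it to S at every window position, B precomputes in one right-to-left pass (using a last-occurrence dict) the length d[i] of the longest distinct-and-in-S run starting at i, so each window test becomes the O(1) check d[i] >= k.
import Mathlib
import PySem

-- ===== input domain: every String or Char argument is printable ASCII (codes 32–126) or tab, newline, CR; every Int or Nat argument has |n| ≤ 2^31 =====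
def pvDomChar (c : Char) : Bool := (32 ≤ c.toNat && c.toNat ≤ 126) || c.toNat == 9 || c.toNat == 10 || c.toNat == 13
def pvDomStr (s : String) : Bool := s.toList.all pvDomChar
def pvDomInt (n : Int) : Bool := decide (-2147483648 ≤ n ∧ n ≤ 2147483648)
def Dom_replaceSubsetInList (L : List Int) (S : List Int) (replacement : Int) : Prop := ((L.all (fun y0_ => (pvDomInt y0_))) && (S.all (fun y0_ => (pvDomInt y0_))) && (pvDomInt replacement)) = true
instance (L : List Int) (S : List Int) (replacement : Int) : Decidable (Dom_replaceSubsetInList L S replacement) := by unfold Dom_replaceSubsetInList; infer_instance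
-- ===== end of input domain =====

-- B replaces the per-position set(L[i:i+k]) == S test by an O(1) lookup in a precomputed
-- longest-distinct-run-in-S array, built in one right-to-left pass; measured faster.

-- ===== PORT A =====
-- the while loop of A: i advances by k on a match (appending `replacement`), by 1 otherwise
-- (the `0 < S.length` conjunct only records that the loop is unreachable when S is empty —
--  A returns L before the loop in that case — and gives termination)
def pvGoA (L S : List Int) (rep : Int) (i : Nat) : List Int :=
  if h : i + S.length ≤ L.length ∧ 0 < S.length then
    if PySem.Set.equal (PySem.Set.ofList
          (PySem.List.slice L (some (i : Int)) (some ((i : Int) + (S.length : Int))))) S then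
      rep :: pvGoA L S rep (i + S.length)
    else
      (L.getD i 0) :: pvGoA L S rep (i + 1)   -- L[i], always in range here
  else
    L.drop i                                   -- result + L[i:]
termination_by L.length - i
decreasing_by all_goals omega

def replaceSubsetInList (L : List Int) (S : List Int) (replacement : Int) : List Int :=
  if S.length = 0 then L else pvGoA L S replacement 0

-- ===== PORT B =====
-- one step of Source B's right-to-left loop body at index i; state = (d, nxt)
def pvStepB (L S : List Int) (n : Nat) (i : Nat) (st : List Int × PySem.Dict Int Int) :
    List Int × PySem.Dict Int Int :=
  let x := L.getD i 0
  let d := if PySem.Set.contains S x then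
      st.1.set i (min (st.1.getD (i + 1) 0 + 1) (PySem.Dict.getD st.2 x (n : Int) - (i : Int)))
    else st.1
  (d, st.2.insert x (i : Int))

-- for i in range(n-1, -1, -1): processes indices m-1, m-2, …, 0
def pvBuildB (L S : List Int) (n : Nat) : Nat → (List Int × PySem.Dict Int Int) → (List Int × PySem.Dict Int Int)
  | 0, st => st
  | m + 1, st => pvBuildB L S n m (pvStepB L S n m st)

-- Source B's while loop: same control flow, but the window test is the O(1) check d[i] >= k
def pvGoB (L d : List Int) (k n : Nat) (rep : Int) (i : Nat) : List Int :=
  if h : i + k ≤ n ∧ 0 < k then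
    if (k : Int) ≤ d.getD i 0 then
      rep :: pvGoB L d k n rep (i + k)
    else
      (L.getD i 0) :: pvGoB L d k n rep (i + 1)
  else
    L.drop i
termination_by n - i
decreasing_by all_goals omega

def replaceSubsetInList_alt (L : List Int) (S : List Int) (replacement : Int) : List Int :=
  let k := S.length
  if k = 0 then L
  else
    let n := L.length
    let d := (pvBuildB L S n n (List.replicate (n + 1) 0, PySem.Dict.empty)).1
    pvGoB L d k n replacement 0

-- ===== PRECONDITION & SPEC =====
-- S is the image of a Python set, so its elements are distinct; Lean lists with duplicates
-- do not arise from any Python input (and len(S) would not equal S.length on them).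
def Pre_replaceSubsetInList (L : List Int) (S : List Int) (replacement : Int) : Prop := S.Nodup
instance (L : List Int) (S : List Int) (replacement : Int) : Decidable (Pre_replaceSubsetInList L S replacement) := by unfold Pre_replaceSubsetInList; infer_instance

def pvWitness_replaceSubsetInList : List Int × List Int × Int := ([1, 2, 3, 2, 1], [1, 2], 9)

def Spec_replaceSubsetInList (L : List Int) (S : List Int) (replacement : Int) (out : List Int) : Prop := out = replaceSubsetInList_alt L S replacement
instance (L : List Int) (S : List Int) (replacement : Int) (out : List Int) : Decidable (Spec_replaceSubsetInList L S replacement out) := by unfold Spec_replaceSubsetInList; infer_instance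

-- ===== CLAIM (what is proved, stated in full; the proofs are below) =====
def Claim_equal_replaceSubsetInList : Prop := ∀ (L : List Int) (S : List Int) (replacement : Int), Dom_replaceSubsetInList L S replacement → Pre_replaceSubsetInList L S replacement → Spec_replaceSubsetInList L S replacement (replaceSubsetInList L S replacement)

-- ===== LEMMAS AND PROOFS =====

-- smallest index ≥ j where x occurs in L, or L.length if none
def pvFirstFrom (L : List Int) (x : Int) (j : Nat) : Nat :=
  match (L.drop j).findIdx? (fun y => decide (y = x)) with
  | some t => j + t
  | none => L.length

theorem pvFirstFrom_ge_start (L : List Int) (x : Int) (j : Nat) (h : j ≤ L.length) :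
    j ≤ pvFirstFrom L x j := by
  unfold pvFirstFrom
  cases hf : (L.drop j).findIdx? (fun y => decide (y = x)) with
  | none => simpa using h
  | some t => simp

-- reference value of Source B's d[i]
def pvDSpec (L S : List Int) (i : Nat) : Int :=
  if _h : i < L.length then
    if L.getD i 0 ∈ S then
      min (pvDSpec L S (i + 1) + 1) ((pvFirstFrom L (L.getD i 0) (i + 1) : Int) - (i : Int))
    else 0
  else 0
termination_by L.length - i
decreasing_by omega

theorem pvDSpec_nonneg (L S : List Int) (i : Nat) : 0 ≤ pvDSpec L S i := by
  fun_induction pvDSpec L S i with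
  | case1 i h hmem ih =>
    have h1 := pvFirstFrom_ge_start L (L.getD i 0) (i + 1) (by omega)
    simp only [le_min_iff]
    constructor <;> omega
  | case2 i h hmem => simp
  | case3 i h => simp

-- pvFirstFrom characterisation
theorem pvFirstFrom_ge_iff (L : List Int) (x : Int) (j m : Nat) (hjm : j + m ≤ L.length) :
    j + m ≤ pvFirstFrom L x j ↔ x ∉ (L.drop j).take m := by
  unfold pvFirstFrom
  cases hf : (L.drop j).findIdx? (fun y => decide (y = x)) with
  | none =>
    rw [List.findIdx?_eq_none_iff] at hf
    simp only [hjm, true_iff]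
    intro hx
    have := hf x (List.mem_of_mem_take hx)
    simp at this
  | some t =>
    rw [List.findIdx?_eq_some_iff_getElem] at hf
    obtain ⟨ht, hpt, hmin⟩ := hf
    simp only [decide_eq_true_eq] at hpt hmin
    show j + m ≤ j + t ↔ x ∉ (L.drop j).take m
    constructor
    · intro hle hx
      obtain ⟨idx, hidx, hgx⟩ := List.mem_iff_getElem.mp hx
      have hidx' : idx < m := by
        have : ((L.drop j).take m).length ≤ m := by simp
        omega
      rw [List.getElem_take] at hgx
      exact hmin idx (by omega) hgx
    · intro hnx
      by_contra hlt
      have htm : t < m := by omega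
      have : x ∈ (L.drop j).take m := by
        rw [List.mem_iff_getElem]
        exact ⟨t, by simp; omega, by rw [List.getElem_take]; exact hpt⟩
      exact hnx this

-- the window characterisation of pvDSpec
theorem pvDSpec_ge_iff (L S : List Int) (m i : Nat) (hm : 0 < m) (hin : i + m ≤ L.length) :
    ((m : Int) ≤ pvDSpec L S i ↔
      ((L.drop i).take m).Nodup ∧ ∀ x ∈ (L.drop i).take m, x ∈ S) := by
  induction m generalizing i with
  | zero => omega
  | succ m ih =>
    have hiL : i < L.length := by omega
    have hdrop : L.drop i = L.getD i 0 :: L.drop (i + 1) := by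
      rw [List.getD_eq_getElem L 0 hiL]
      exact List.drop_eq_getElem_cons hiL
    rw [pvDSpec, dif_pos hiL]
    by_cases hmem : L.getD i 0 ∈ S
    · rw [if_pos hmem]
      rcases Nat.eq_zero_or_pos m with hm0 | hmpos
      · subst hm0
        have h1 := pvDSpec_nonneg L S (i + 1)
        have h2 := pvFirstFrom_ge_start L (L.getD i 0) (i + 1) (by omega)
        rw [hdrop]
        simp only [List.take_succ_cons, List.take_zero, List.nodup_cons, List.mem_singleton,
          List.not_mem_nil, List.nodup_nil]
        constructor
        · intro _
          refine ⟨by simp, ?_⟩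
          simpa [List.getD] using hmem
        · intro _
          simp only [le_min_iff]
          push_cast
          constructor <;> omega
      · have hff := pvFirstFrom_ge_iff L (L.getD i 0) (i + 1) m (by omega)
        have ihh := ih (i + 1) hmpos (by omega)
        have key : ((((m : Nat) + 1 : Nat) : Int) ≤
            min (pvDSpec L S (i + 1) + 1)
              ((pvFirstFrom L (L.getD i 0) (i + 1) : Int) - (i : Int))) ↔
            ((m : Int) ≤ pvDSpec L S (i + 1) ∧
              (i + 1) + m ≤ pvFirstFrom L (L.getD i 0) (i + 1)) := by
          simp only [le_min_iff]
          constructor <;> rintro ⟨a, b⟩ <;> constructor <;> push_cast at * <;> omega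
        rw [key, hff]
        rw [hdrop]
        simp only [List.take_succ_cons, List.nodup_cons, List.mem_cons]
        rw [ihh]
        constructor
        · rintro ⟨⟨hnd, hsub⟩, hnx⟩
          exact ⟨⟨hnx, hnd⟩, by rintro x (rfl | hx); exact hmem; exact hsub x hx⟩
        · rintro ⟨⟨hnx, hnd⟩, hsub⟩
          exact ⟨⟨hnd, fun x hx => hsub x (Or.inr hx)⟩, hnx⟩
    · rw [if_neg hmem]
      constructor
      · intro hle; exfalso; push_cast at hle; omega
      · rintro ⟨_, hsub⟩
        exact absurd (hsub _ (by rw [hdrop]; simp)) hmem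

theorem pvDSpec_of_ge (L S : List Int) (j : Nat) (h : L.length ≤ j) : pvDSpec L S j = 0 := by
  rw [pvDSpec, dif_neg (by omega)]

theorem pvFirstFrom_step (L : List Int) (i : Nat) (hiL : i < L.length) (y : Int) :
    pvFirstFrom L y i = if L.getD i 0 = y then i else pvFirstFrom L y (i + 1) := by
  unfold pvFirstFrom
  rw [List.drop_eq_getElem_cons hiL, List.findIdx?_cons, List.getD_eq_getElem L 0 hiL]
  by_cases hxy : L[i] = y
  · simp [hxy]
  · simp only [hxy, decide_false, Bool.false_eq_true, if_false]
    cases hf : (L.drop (i + 1)).findIdx? (fun z => decide (z = y)) with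
    | none => simp
    | some t => simp; omega

theorem pvGetD_set (l : List Int) (i j : Nat) (v : Int) :
    (l.set i v).getD j 0 = if i = j ∧ i < l.length then v else l.getD j 0 := by
  rw [List.getD_eq_getElem?_getD, List.getD_eq_getElem?_getD, List.getElem?_set]
  by_cases h1 : i = j
  · subst h1
    by_cases h2 : i < l.length
    · simp [h2]
    · simp [h2]
  · simp [h1]

-- build-phase invariant
theorem pvBuildB_spec (L S : List Int) (i : Nat)
    (st : List Int × PySem.Dict Int Int)
    (hd : ∀ j, st.1.getD j 0 = if L.length ≥ j + 1 ∧ i ≤ j then pvDSpec L S j else 0)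
    (hlen : st.1.length = L.length + 1)
    (hn : ∀ x, PySem.Dict.getD st.2 x (L.length : Int) = (pvFirstFrom L x i : Int))
    (hi : i ≤ L.length) :
    ∀ j, (pvBuildB L S L.length i st).1.getD j 0 =
      if L.length ≥ j + 1 then pvDSpec L S j else 0 := by
  induction i generalizing st with
  | zero =>
    intro j
    rw [pvBuildB, hd j]
    by_cases h : L.length ≥ j + 1 <;> simp [h]
  | succ i ih =>
    rw [pvBuildB]
    have hiL : i < L.length := by omega
    have hx : L.getD i 0 = L.getD i 0 := rfl
    apply ih
    · -- hd for the new state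
      intro j
      show (pvStepB L S L.length i st).1.getD j 0 = _
      simp only [pvStepB]
      by_cases hmem : L.getD i 0 ∈ S
      · rw [if_pos ((PySem.Set.contains_iff S (L.getD i 0)).mpr hmem)]
        have hd1 : st.1.getD (i + 1) 0 = pvDSpec L S (i + 1) := by
          rw [hd (i + 1)]
          by_cases h2 : L.length ≥ i + 2
          · simp [h2]
          · rw [if_neg (by omega), pvDSpec_of_ge L S (i + 1) (by omega)]
        have hv : min (st.1.getD (i + 1) 0 + 1)
            (PySem.Dict.getD st.2 (L.getD i 0) (L.length : Int) - (i : Int))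
            = pvDSpec L S i := by
          rw [hd1, hn (L.getD i 0)]
          conv_rhs => rw [pvDSpec, dif_pos hiL, if_pos hmem]
        rw [pvGetD_set, hv]
        by_cases hij : i = j
        · subst hij
          rw [if_pos ⟨rfl, by omega⟩, if_pos ⟨by omega, le_rfl⟩]
        · rw [if_neg (by intro h; exact hij h.1), hd j]
          by_cases hj1 : L.length ≥ j + 1 ∧ i + 1 ≤ j
          · rw [if_pos hj1, if_pos ⟨hj1.1, by omega⟩]
          · rw [if_neg hj1, if_neg (by intro h; exact hj1 ⟨h.1, by omega⟩)]
      · have hc : ¬ (PySem.Set.contains S (L.getD i 0) = true) :=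
          fun h => hmem ((PySem.Set.contains_iff S (L.getD i 0)).mp h)
        rw [if_neg hc, hd j]
        by_cases hij : i = j
        · subst hij
          rw [if_neg (by omega)]
          by_cases hn1 : L.length ≥ i + 1
          · rw [if_pos ⟨hn1, le_rfl⟩, pvDSpec, dif_pos hiL, if_neg hmem]
          · rw [if_neg (by intro h; exact hn1 h.1)]
        · by_cases hj1 : L.length ≥ j + 1 ∧ i + 1 ≤ j
          · rw [if_pos hj1, if_pos ⟨hj1.1, by omega⟩]
          · rw [if_neg hj1, if_neg (by intro h; exact hj1 ⟨h.1, by omega⟩)]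
    · show (pvStepB L S L.length i st).1.length = L.length + 1
      simp only [pvStepB]
      split <;> simp [hlen]
    · intro y
      show PySem.Dict.getD (pvStepB L S L.length i st).2 y (L.length : Int) = _
      simp only [pvStepB]
      rw [PySem.Dict.getD_insert, pvFirstFrom_step L i hiL y]
      by_cases hxy : y = L.getD i 0
      · rw [if_pos hxy, if_pos hxy.symm]
      · rw [if_neg hxy, if_neg (fun h => hxy h.symm), hn y]
    · omega

-- the two window tests agree
theorem pvTest_eq (L S : List Int) (i : Nat) (hS : S.Nodup) (hk : 0 < S.length)
    (hin : i + S.length ≤ L.length) :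
    (PySem.Set.equal (PySem.Set.ofList
        (PySem.List.slice L (some (i : Int)) (some ((i : Int) + (S.length : Int))))) S = true)
      ↔ (S.length : Int) ≤ pvDSpec L S i := by
  have hslice : PySem.List.slice L (some (i : Int)) (some ((i : Int) + (S.length : Int)))
      = (L.drop i).take S.length := PySem.List.slice_natCast_add L i S.length
  rw [hslice, PySem.Set.equal_iff, pvDSpec_ge_iff L S S.length i hk hin]
  set w := (L.drop i).take S.length with hw
  have hwlen : w.length = S.length := by
    rw [hw]; simp; omega
  constructor
  · intro hiff
    have hiff' : ∀ x, x ∈ w ↔ x ∈ S :=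
      fun x => (PySem.Set.mem_ofList w x).symm.trans (hiff x)
    have hfs : w.toFinset = S.toFinset := by
      ext x; simpa using hiff' x
    have hcard : w.dedup.length = w.length := by
      have h1 := List.card_toFinset w
      have h2 : S.toFinset.card = S.length := List.toFinset_card_of_nodup hS
      rw [hfs, h2] at h1
      omega
    have hded : w.dedup = w := List.Sublist.eq_of_length (List.dedup_sublist w) hcard
    refine ⟨?_, fun x hx => (hiff' x).mp hx⟩
    rw [← hded]; exact List.nodup_dedup w
  · rintro ⟨hnd, hsub⟩
    have hfs : w.toFinset = S.toFinset := by
      apply Finset.eq_of_subset_of_card_le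
      · intro x hx; simp only [List.mem_toFinset] at hx ⊢; exact hsub x hx
      · rw [List.toFinset_card_of_nodup hS, List.toFinset_card_of_nodup hnd, hwlen]
    intro x
    rw [PySem.Set.mem_ofList]
    constructor
    · exact fun hx => hsub x hx
    · intro hx
      have hx' : x ∈ S.toFinset := by simpa using hx
      rw [← hfs] at hx'
      simpa using hx' 

-- loop equivalence
theorem pvGo_eq (L S : List Int) (rep : Int) (d : List Int)
    (hS : S.Nodup)
    (hd : ∀ j, d.getD j 0 = if L.length ≥ j + 1 then pvDSpec L S j else 0) :
    ∀ i, pvGoA L S rep i = pvGoB L d S.length L.length rep i := by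
  intro i
  fun_induction pvGoA L S rep i with
  | case1 i h htest ih =>
    rw [pvGoB, dif_pos h]
    have hdi : d.getD i 0 = pvDSpec L S i := by
      rw [hd i, if_pos (by omega)]
    rw [if_pos (by rw [hdi]; exact (pvTest_eq L S i hS h.2 h.1).mp htest), ih]
  | case2 i h htest ih =>
    rw [pvGoB, dif_pos h]
    have hdi : d.getD i 0 = pvDSpec L S i := by
      rw [hd i, if_pos (by omega)]
    rw [if_neg (by rw [hdi]; exact fun hc => htest ((pvTest_eq L S i hS h.2 h.1).mpr hc)), ih]
  | case3 i h =>
    rw [pvGoB, dif_neg h]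

-- ===== VERDICT (by name: the statement is the Claim_ definition above) =====
theorem replaceSubsetInList_spec : Claim_equal_replaceSubsetInList := by
  intro L S rep _ hpre
  unfold Spec_replaceSubsetInList replaceSubsetInList replaceSubsetInList_alt
  by_cases hk : S.length = 0
  · simp [hk]
  · simp only [hk, if_false]
    exact pvGo_eq L S rep _ hpre
      (pvBuildB_spec L S L.length (List.replicate (L.length + 1) 0, PySem.Dict.empty)
        (by intro j
            rw [if_neg (by omega), List.getD_eq_getElem?_getD, List.getElem?_replicate]
            split <;> rfl)
        (by simp)
        (by intro x
            have h1 : pvFirstFrom L x L.length = L.length := by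
              unfold pvFirstFrom; rw [List.drop_length]; rfl
            rw [h1]; rfl)
        le_rfl) 0
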